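-- pv_equiv track=rewrite | github.com/sruon/FFXI-EventsDump | parser/opcodes/scheduler_base.py | format_scheduler_id
-- ===== SOURCE A (Python) =====
-- def format_scheduler_id(scheduler_id: int) -> str:
--     """Format a scheduler ID value, attempting ASCII decoding."""
--     scheduler_bytes = scheduler_id.to_bytes(4, byteorder="little")
--     try:
--         scheduler_str = scheduler_bytes.decode("ascii").rstrip("\x00")
--         if scheduler_str and all(32 <= ord(c) <= 126 for c in scheduler_str):
--             return f'"{scheduler_str}"'
--     except (UnicodeDecodeError, ValueError):
--         pass
--     return f"0x{scheduler_id:08X}"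
-- ===== SOURCE B (Python) =====
-- def format_scheduler_id(scheduler_id: int) -> str:
--     """Format a scheduler ID value, attempting ASCII decoding."""
--     bs = scheduler_id.to_bytes(4, byteorder="little")
--     n = len(bs)
--     while n > 0 and bs[n - 1] == 0:
--         n -= 1
--     if n > 0 and all(32 <= b <= 126 for b in bs[:n]):
--         return '"' + ''.join(chr(b) for b in bs[:n]) + '"'
--     return f"0x{scheduler_id:08X}"
-- ===== Notes on version B (the rewrite author's own statement) =====
-- stated objective: simpler
-- what changed: B drops A's ASCII decode / try-except / rstrip pipeline and instead trims trailing zero bytes with an index loop and checks the raw byte values against the printable range 32..126 directly, building the string with chr/join.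
import Mathlib
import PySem

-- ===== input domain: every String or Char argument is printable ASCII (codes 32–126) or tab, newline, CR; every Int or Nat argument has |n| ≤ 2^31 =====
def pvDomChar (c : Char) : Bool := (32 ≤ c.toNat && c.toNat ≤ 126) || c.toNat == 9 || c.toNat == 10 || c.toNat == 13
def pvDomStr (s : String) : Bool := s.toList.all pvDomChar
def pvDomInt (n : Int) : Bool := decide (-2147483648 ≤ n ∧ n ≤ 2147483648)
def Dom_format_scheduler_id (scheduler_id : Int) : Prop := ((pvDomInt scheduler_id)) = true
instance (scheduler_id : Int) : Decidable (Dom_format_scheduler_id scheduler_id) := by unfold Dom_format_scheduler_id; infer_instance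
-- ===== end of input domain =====

-- B replaces A's decode/try-except/rstrip pipeline by a direct scan of the raw byte
-- values (trim trailing zero bytes, then one printable-range check); objective: simpler.

-- shared helpers: both Pythons call scheduler_id.to_bytes(4, "little") and format
-- the fallback with the same f-string f"0x{scheduler_id:08X}".
-- to_bytes(4,'little'): exact for 0 ≤ n < 2^32 (Python raises OverflowError elsewhere; excluded by Pre_)
def pvBytesLE4 (n : Int) : List Nat :=
  (List.range 4).map (fun i => n.toNat / 256 ^ i % 256)

-- f"0x{n:08X}": exact for 0 ≤ n < 2^32 (8 uppercase hex digits, zero-padded)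
def pvHexDigit (d : Nat) : Char :=
  if d < 10 then Char.ofNat (48 + d) else Char.ofNat (55 + d)
def pvHex8 (n : Int) : String :=
  "0x" ++ String.ofList (((List.range 8).reverse).map (fun i => pvHexDigit (n.toNat / 16 ^ i % 16)))

-- ===== PORT A =====
-- .rstrip("\x00"): drop '\x00' characters from the right end only (hand-ported; exact)
def pvRstripNull (cs : List Char) : List Char :=
  (cs.reverse.dropWhile (· == Char.ofNat 0)).reverse

def format_scheduler_id (scheduler_id : Int) : String :=
  let scheduler_bytes := pvBytesLE4 scheduler_id
  -- .decode("ascii") succeeds iff every byte value is < 128 (hand-ported; exact)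
  if scheduler_bytes.all (fun b => b < 128) then
    let scheduler_str := pvRstripNull (scheduler_bytes.map Char.ofNat)
    if scheduler_str ≠ [] ∧ scheduler_str.all (fun c => 32 ≤ c.toNat && c.toNat ≤ 126) then
      "\"" ++ String.ofList scheduler_str ++ "\""
    else pvHex8 scheduler_id
  else pvHex8 scheduler_id

-- ===== PORT B =====
-- the while loop 'while n > 0 and bs[n-1] == 0: n -= 1'
def pvTrimLen (bs : List Nat) : Nat → Nat
  | 0 => 0
  | k + 1 => if bs.getD k 0 == 0 then pvTrimLen bs k else k + 1

def format_scheduler_id_alt (scheduler_id : Int) : String :=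
  let bs := pvBytesLE4 scheduler_id
  let n := pvTrimLen bs bs.length
  if n > 0 && (bs.take n).all (fun b => 32 ≤ b && b ≤ 126) then
    "\"" ++ String.ofList ((bs.take n).map Char.ofNat) ++ "\""
  else pvHex8 scheduler_id

-- ===== PRECONDITION & SPEC =====
-- A raises OverflowError on negative scheduler_id (int.to_bytes); within Dom (|n| ≤ 2^31 < 2^32)
-- that is the only failure, so Pre_ is nonnegativity.
def Pre_format_scheduler_id (scheduler_id : Int) : Prop := 0 ≤ scheduler_id
instance (scheduler_id : Int) : Decidable (Pre_format_scheduler_id scheduler_id) := by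
  unfold Pre_format_scheduler_id; infer_instance
def pvWitness_format_scheduler_id : Int := 4342338

def Spec_format_scheduler_id (scheduler_id : Int) (out : String) : Prop := out = format_scheduler_id_alt scheduler_id
instance (scheduler_id : Int) (out : String) : Decidable (Spec_format_scheduler_id scheduler_id out) := by unfold Spec_format_scheduler_id; infer_instance

-- ===== CLAIM (what is proved, stated in full; the proofs are below) =====
def Claim_equal_format_scheduler_id : Prop := ∀ (scheduler_id : Int), Dom_format_scheduler_id scheduler_id → Pre_format_scheduler_id scheduler_id → Spec_format_scheduler_id scheduler_id (format_scheduler_id scheduler_id)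

-- ===== LEMMAS AND PROOFS =====

theorem pv_chr_toNat (b : Nat) (h : b < 256) : (Char.ofNat b).toNat = b := by
  have hv : b.isValidChar := Or.inl (by omega)
  simp [Char.ofNat, hv]

theorem pv_chr_eq_zero (b : Nat) (h : b < 256) :
    ((Char.ofNat b == Char.ofNat 0)) = decide (b = 0) := by
  by_cases hb : b = 0
  · subst hb; simp
  · simp only [decide_eq_false hb]
    apply decide_eq_false
    intro hc
    have := congrArg Char.toNat hc
    rw [pv_chr_toNat b h, pv_chr_toNat 0 (by omega)] at this
    omega

set_option maxHeartbeats 1600000 in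
theorem pv_core (b0 b1 b2 b3 : Nat) (h0 : b0 < 256) (h1 : b1 < 256) (h2 : b2 < 256)
    (h3 : b3 < 256) (n : Int) :
    (if ([b0,b1,b2,b3] : List Nat).all (fun b => b < 128) then
      (let s := pvRstripNull (([b0,b1,b2,b3] : List Nat).map Char.ofNat)
       if s ≠ [] ∧ s.all (fun c => 32 ≤ c.toNat && c.toNat ≤ 126) then
        "\"" ++ String.ofList s ++ "\"" else pvHex8 n)
     else pvHex8 n)
    =
    (let n' := pvTrimLen [b0,b1,b2,b3] 4
     if n' > 0 && (([b0,b1,b2,b3] : List Nat).take n').all (fun b => 32 ≤ b && b ≤ 126) then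
      "\"" ++ String.ofList ((([b0,b1,b2,b3] : List Nat).take n').map Char.ofNat) ++ "\""
     else pvHex8 n) := by
  by_cases e3 : b3 = 0 <;> by_cases e2 : b2 = 0 <;> by_cases e1 : b1 = 0 <;>
    by_cases e0 : b0 = 0 <;>
    simp [pvRstripNull, pvTrimLen, List.all_cons, List.all_nil, List.reverse_cons,
      List.reverse_nil, List.nil_append, List.cons_append, List.map_cons, List.map_nil,
      List.dropWhile, List.getD, Option.getD_some, List.take_succ_cons, List.take_zero, gt_iff_lt,
      pv_chr_eq_zero b0 h0, pv_chr_eq_zero b1 h1, pv_chr_eq_zero b2 h2, pv_chr_eq_zero b3 h3,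
      pv_chr_toNat b0 h0, pv_chr_toNat b1 h1, pv_chr_toNat b2 h2, pv_chr_toNat b3 h3,
      e0, e1, e2, e3, decide_true, decide_false, Bool.and_eq_true, decide_eq_true_eq,
      Bool.and_true, Bool.true_and, Bool.false_and, Bool.and_false, ne_eq,
      ] <;>
    (intros; first | rfl | (exfalso; omega))

theorem pv_bytes_eq (n : Int) :
    pvBytesLE4 n = [n.toNat % 256, n.toNat / 256 % 256, n.toNat / 65536 % 256,
      n.toNat / 16777216 % 256] := by
  simp [pvBytesLE4, List.range_succ]

-- ===== VERDICT (by name: the statement is the Claim_ definition above) =====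
theorem format_scheduler_id_spec : Claim_equal_format_scheduler_id := by
  intro n _ _
  unfold Spec_format_scheduler_id format_scheduler_id format_scheduler_id_alt
  rw [pv_bytes_eq]
  exact pv_core _ _ _ _ (Nat.mod_lt _ (by omega)) (Nat.mod_lt _ (by omega))
    (Nat.mod_lt _ (by omega)) (Nat.mod_lt _ (by omega)) n
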